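-- pv_equiv track=rewrite | github.com/customaddone/beginPython | cgi-bin/library/dp/bit_dp.py | close
-- ===== SOURCE A (Python) =====
-- def close(bit, n):
--     # n = bit.bit_length()
--     res = [[] for i in range(n)]
--     build = -1
--     not_build = []
--     for i in range(n):
--         # フラグが立っている
--         if bit & (1 << i):
--             build = i
--             # 右側のフラグについて
--             while not_build:
--                 p = not_build.pop()
--                 res[p].append(build)
--         else:
--             # 左側のフラグについて
--             if build >= 0:
--                 res[i].append(build)
--             not_build.append(i)
--
--     return res
-- ===== SOURCE B (Python) =====
-- def close(bit, n):
--     res = [[] for _ in range(n)]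
--     left = -1
--     for i in range(n):
--         if bit & (1 << i):
--             left = i
--         elif left >= 0:
--             res[i].append(left)
--     right = -1
--     for i in reversed(range(n)):
--         if bit & (1 << i):
--             right = i
--         elif right >= 0:
--             res[i].append(right)
--     return res
-- ===== Notes on version B (the rewrite author's own statement) =====
-- stated objective: simpler
-- what changed: Replaces A's single pass with a pending-index stack (drained whenever a set bit appears) by two stateless directional scans: a forward scan appending the nearest set bit on the left, then a backward scan appending the nearest set bit on the right.
import Mathlib
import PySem

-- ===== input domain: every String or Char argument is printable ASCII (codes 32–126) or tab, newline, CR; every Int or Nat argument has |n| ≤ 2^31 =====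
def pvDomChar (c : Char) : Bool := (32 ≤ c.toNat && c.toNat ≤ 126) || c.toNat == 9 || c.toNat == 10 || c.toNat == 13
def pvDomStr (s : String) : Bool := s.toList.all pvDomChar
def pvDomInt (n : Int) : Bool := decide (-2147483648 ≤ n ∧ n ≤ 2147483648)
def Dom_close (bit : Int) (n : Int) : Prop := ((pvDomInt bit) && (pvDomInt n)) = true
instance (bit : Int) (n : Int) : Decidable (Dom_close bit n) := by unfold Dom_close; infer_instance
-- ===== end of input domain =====

-- B replaces A's stack of pending unset indices with two simple directional scans
-- (forward for the nearest set bit on the left, backward for the one on the right);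
-- objective: simpler. Same O(n) cost; return value only, no observable mutation.

-- shared exact helpers used by both ports:
-- Python test `bit & (1 << i)` is truthy  (1 << i = 2^i for i ≥ 0; band is Python-exact on negatives)
def pyTB (bit : Int) (i : Nat) : Bool := PySem.Int.band bit ((2:Int) ^ i) != 0
-- `res[p].append(v)` on a list of lists
def pyApp : List (List Int) → Nat → Int → List (List Int)
  | [], _, _ => []
  | x :: xs, 0, v => (x ++ [v]) :: xs
  | x :: xs, p + 1, v => x :: pyApp xs p v

-- ===== PORT A =====
-- `while not_build: p = not_build.pop(); res[p].append(build)` — stack held head-first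
def drainA (res : List (List Int)) (v : Int) : List Nat → List (List Int)
  | [] => res
  | p :: rest => drainA (pyApp res p v) v rest

-- one iteration of A's `for i in range(n)` body on state (res, build, not_build)
def stepA (bit : Int) (st : List (List Int) × Int × List Nat) (i : Nat) :
    List (List Int) × Int × List Nat :=
  if pyTB bit i then
    (drainA st.1 (i : Int) st.2.2, (i : Int), [])
  else
    (if st.2.1 ≥ 0 then pyApp st.1 i st.2.1 else st.1, st.2.1, i :: st.2.2)

-- state after the first m iterations; N = len(res) = number of loop iterations
def loopA (bit : Int) (N : Nat) : Nat → List (List Int) × Int × List Nat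
  | 0 => (List.replicate N [], -1, [])
  | m + 1 => stepA bit (loopA bit N m) m

def close (bit : Int) (n : Int) : List (List Int) :=
  (loopA bit n.toNat n.toNat).1

-- ===== PORT B =====
-- forward scan: state (res, left) after the first m iterations
def loopF (bit : Int) (N : Nat) : Nat → List (List Int) × Int
  | 0 => (List.replicate N [], -1)
  | m + 1 =>
    let st := loopF bit N m
    if pyTB bit m then (st.1, (m : Int))
    else if st.2 ≥ 0 then (pyApp st.1 m st.2, st.2) else st

-- backward scan over indices m-1, …, 0 with current `right` = r
def loopB (bit : Int) (res : List (List Int)) (r : Int) : Nat → List (List Int)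
  | 0 => res
  | m + 1 =>
    if pyTB bit m then loopB bit res (m : Int) m
    else if r ≥ 0 then loopB bit (pyApp res m r) r m
    else loopB bit res r m

def close_alt (bit : Int) (n : Int) : List (List Int) :=
  loopB bit (loopF bit n.toNat n.toNat).1 (-1) n.toNat

-- ===== PRECONDITION & SPEC =====
def Spec_close (bit : Int) (n : Int) (out : List (List Int)) : Prop := out = close_alt bit n
instance (bit : Int) (n : Int) (out : List (List Int)) : Decidable (Spec_close bit n out) := by unfold Spec_close; infer_instance

-- ===== CLAIM (what is proved, stated in full; the proofs are below) =====
def Claim_equal_close : Prop := ∀ (bit : Int) (n : Int), Dom_close bit n → Spec_close bit n (close bit n)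

-- ===== LEMMAS AND PROOFS =====

-- A's not_build stack after m iterations, as a standalone recursion
def nbF (bit : Int) : Nat → List Nat
  | 0 => []
  | m + 1 => if pyTB bit m then [] else m :: nbF bit m

theorem pyApp_comm (res : List (List Int)) (i j : Nat) (vi vj : Int) (h : i ≠ j) :
    pyApp (pyApp res i vi) j vj = pyApp (pyApp res j vj) i vi := by
  induction res generalizing i j with
  | nil => simp [pyApp]
  | cons x xs ih =>
    cases i with
    | zero => cases j with
      | zero => exact absurd rfl h
      | succ j => simp [pyApp]
    | succ i => cases j with
      | zero => simp [pyApp]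
      | succ j => simp [pyApp]; exact ih i j (by omega)

-- loopB only touches indices < m, so an append at p ≥ m commutes past it
theorem loopB_pyApp (bit : Int) (m : Nat) :
    ∀ (res : List (List Int)) (r : Int) (p : Nat) (v : Int), m ≤ p →
    loopB bit (pyApp res p v) r m = pyApp (loopB bit res r m) p v := by
  induction m with
  | zero => intro res r p v _; rfl
  | succ m ih =>
    intro res r p v hp
    by_cases h : pyTB bit m
    · simp [loopB, h]; exact ih res (m : Int) p v (by omega)
    · by_cases hr : r ≥ 0
      · simp [loopB, h, hr]
        rw [pyApp_comm res p m v r (by omega)]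
        exact ih (pyApp res m r) r p v (by omega)
      · simp [loopB, h, hr]; exact ih res r p v (by omega)

-- starting the backward scan with right = v ≥ 0 instead of -1 appends v exactly
-- at A's pending stack entries
theorem loopB_shift (bit : Int) (m : Nat) :
    ∀ (res : List (List Int)) (v : Int), 0 ≤ v →
    loopB bit res v m = drainA (loopB bit res (-1) m) v (nbF bit m) := by
  induction m with
  | zero => intro res v _; rfl
  | succ m ih =>
    intro res v hv
    by_cases h : pyTB bit m
    · simp [loopB, nbF, h, drainA]
    · have h1 : ¬ ((-1 : Int) ≥ 0) := by omega
      simp [loopB, nbF, h, hv, drainA]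
      rw [ih (pyApp res m v) v hv, loopB_pyApp bit m res (-1) m v (le_refl m)]
  -- the drainA unfolding above consumes the head m of the stack

-- the main invariant: builds agree, the stack is nbF, and A's partial result is
-- B's forward result with the backward scan over the already-seen prefix applied
theorem mainInv (bit : Int) (N : Nat) (m : Nat) :
    (loopA bit N m).2.1 = (loopF bit N m).2 ∧
    (loopA bit N m).2.2 = nbF bit m ∧
    (loopA bit N m).1 = loopB bit (loopF bit N m).1 (-1) m := by
  induction m with
  | zero => exact ⟨rfl, rfl, rfl⟩
  | succ m ih =>
    obtain ⟨hb, hs, hr⟩ := ih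
    by_cases h : pyTB bit m
    · refine ⟨?_, ?_, ?_⟩ <;>
        simp [loopA, stepA, loopF, loopB, nbF, h, hs, hr]
      rw [loopB_shift bit m (loopF bit N m).1 (m : Int) (by omega)]
    · have h1 : ¬ ((-1 : Int) ≥ 0) := by omega
      by_cases hg : (loopF bit N m).2 ≥ 0
      · refine ⟨?_, ?_, ?_⟩ <;>
          simp [loopA, stepA, loopF, loopB, nbF, h, hb, hs, hr, hg]
        exact (loopB_pyApp bit m (loopF bit N m).1 (-1) m (loopF bit N m).2 (le_refl m)).symm
      · refine ⟨?_, ?_, ?_⟩ <;>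
          simp [loopA, stepA, loopF, loopB, nbF, h, hb, hs, hr, hg]

-- ===== VERDICT (by name: the statement is the Claim_ definition above) =====
theorem close_spec : Claim_equal_close := by
  intro bit n _
  unfold Spec_close close close_alt
  exact (mainInv bit n.toNat n.toNat).2.2
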